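-- pv_equiv track=rewrite | github.com/Dummy-Bug/Data-Structures-and-Algorithms | LeetCode daily challenges/01 June 2022/07 Palindromic Subsequences.py | removePalindromeSub
-- ===== SOURCE A (Python) =====
-- def removePalindromeSub(s: str) -> int:
--
--     i = 0
--     j = len(s)-1
--
--     while i <= j:
--
--         if s[i] != s[j]:
--             return 2
--
--         i = i + 1
--         j = j - 1
--
--     return 1
-- ===== SOURCE B (Python) =====
-- def removePalindromeSub(s: str) -> int:
--     rev = s[::-1]
--     return 1 if s == rev else 2
-- ===== Notes on version B (the rewrite author's own statement) =====
-- stated objective: idiomatic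
-- what changed: Replaces the early-exit two-pointer inward scan with building the reversed copy s[::-1] once and a single whole-string equality comparison.
import Mathlib
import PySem

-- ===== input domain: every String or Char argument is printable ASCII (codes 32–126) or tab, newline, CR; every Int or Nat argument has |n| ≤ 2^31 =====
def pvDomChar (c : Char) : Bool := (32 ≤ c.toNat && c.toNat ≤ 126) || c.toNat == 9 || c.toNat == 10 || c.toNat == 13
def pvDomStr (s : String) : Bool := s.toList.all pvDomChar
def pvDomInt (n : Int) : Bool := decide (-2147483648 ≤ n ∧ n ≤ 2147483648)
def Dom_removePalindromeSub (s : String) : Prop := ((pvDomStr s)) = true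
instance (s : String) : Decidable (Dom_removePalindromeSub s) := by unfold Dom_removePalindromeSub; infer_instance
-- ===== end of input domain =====

-- B builds the reversed copy once (s[::-1]) and compares whole strings, instead of A's
-- early-exit two-pointer inward scan; same behaviour, more idiomatic.

-- ===== PORT A =====
-- the while loop of A: i, j move inward until they cross or a mismatch is found
def removePalindromeSubLoop (cs : List Char) (i j : Int) : Int :=
  if _h : i ≤ j then
    if PySem.List.pyGet? cs i ≠ PySem.List.pyGet? cs j then 2
    else removePalindromeSubLoop cs (i + 1) (j - 1)
  else 1
termination_by (j - i + 1).toNat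
decreasing_by omega

def removePalindromeSub (s : String) : Int :=
  removePalindromeSubLoop s.toList 0 (PySem.Str.len s - 1)

-- ===== PORT B =====
def removePalindromeSub_alt (s : String) : Int :=
  match PySem.Str.slice? s none none (-1) with
  | some rev => if s = rev then 1 else 2
  | none => 2   -- unreachable: step is -1, never 0

-- ===== PRECONDITION & SPEC =====
def Spec_removePalindromeSub (s : String) (out : Int) : Prop := out = removePalindromeSub_alt s
instance (s : String) (out : Int) : Decidable (Spec_removePalindromeSub s out) := by unfold Spec_removePalindromeSub; infer_instance

-- ===== CLAIM (what is proved, stated in full; the proofs are below) =====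
def Claim_equal_removePalindromeSub : Prop := ∀ (s : String), Dom_removePalindromeSub s → Spec_removePalindromeSub s (removePalindromeSub s)

-- ===== LEMMAS AND PROOFS =====

-- one inward step from both ends: the loop on (a :: cs) ++ [b] at shifted indices equals the loop on cs
theorem removePalindromeSubLoop_shift (a b : Char) (cs : List Char) (i j : Int)
    (hi : 0 ≤ i) (hj : j < cs.length) :
    removePalindromeSubLoop ((a :: cs) ++ [b]) (i + 1) (j + 1) = removePalindromeSubLoop cs i j := by
  by_cases h : i ≤ j
  · have hgi : PySem.List.pyGet? ((a :: cs) ++ [b]) (i + 1) = PySem.List.pyGet? cs i := by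
      rw [PySem.List.pyGet?_of_nonneg _ (by omega), PySem.List.pyGet?_of_nonneg _ hi]
      have h1 : (i + 1).toNat = i.toNat + 1 := by omega
      rw [h1]
      simp only [List.cons_append, List.getElem?_cons_succ]
      rw [List.getElem?_append_left (by omega)]
    have hgj : PySem.List.pyGet? ((a :: cs) ++ [b]) (j + 1) = PySem.List.pyGet? cs j := by
      rw [PySem.List.pyGet?_of_nonneg _ (by omega), PySem.List.pyGet?_of_nonneg _ (by omega)]
      have h1 : (j + 1).toNat = j.toNat + 1 := by omega
      rw [h1]
      simp only [List.cons_append, List.getElem?_cons_succ]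
      rw [List.getElem?_append_left (by omega)]
    conv_lhs => rw [removePalindromeSubLoop]
    conv_rhs => rw [removePalindromeSubLoop]
    rw [dif_pos (by omega : i + 1 ≤ j + 1), dif_pos h, hgi, hgj]
    by_cases hne : PySem.List.pyGet? cs i ≠ PySem.List.pyGet? cs j
    · rw [if_pos hne, if_pos hne]
    · rw [if_neg hne, if_neg hne]
      have hrec := removePalindromeSubLoop_shift a b cs (i + 1) (j - 1) (by omega) (by omega)
      have e2 : j + 1 - 1 = j - 1 + 1 := by ring
      rw [e2]
      exact hrec
  · conv_lhs => rw [removePalindromeSubLoop]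
    conv_rhs => rw [removePalindromeSubLoop]
    rw [dif_neg (by omega : ¬ (i + 1 ≤ j + 1)), dif_neg h]
termination_by (j - i + 1).toNat
decreasing_by omega

-- a cons/append list equals its reverse iff the ends match and the middle does
theorem pal_cons_append_iff (a b : Char) (cs : List Char) :
    ((a :: cs) ++ [b] = ((a :: cs) ++ [b]).reverse) ↔ (b = a ∧ cs = cs.reverse) := by
  simp [List.reverse_append]
  constructor
  · rintro ⟨h1, h2⟩
    subst h1
    simpa using h2
  · rintro ⟨h1, h2⟩
    subst h1
    simpa using h2

-- A's loop from the outer ends decides whether the list is its own reverse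
theorem removePalindromeSubLoop_eq (cs : List Char) :
    removePalindromeSubLoop cs 0 ((cs.length : Int) - 1) =
      if cs = cs.reverse then 1 else 2 := by
  induction cs using List.bidirectionalRec with
  | nil => rw [removePalindromeSubLoop]; norm_num
  | singleton a =>
      rw [removePalindromeSubLoop]
      norm_num
      rw [removePalindromeSubLoop]
      norm_num
  | cons_append a cs b ih =>
      show removePalindromeSubLoop ((a :: cs) ++ [b]) 0 ((((a :: cs) ++ [b]).length : Int) - 1)
        = if (a :: cs) ++ [b] = ((a :: cs) ++ [b]).reverse then 1 else 2
      have hlen : ((((a :: cs) ++ [b]).length : Int)) - 1 = (cs.length : Int) + 1 := by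
        simp
      rw [hlen, removePalindromeSubLoop, dif_pos (by positivity)]
      have hga : PySem.List.pyGet? ((a :: cs) ++ [b]) 0 = some a := by
        rw [List.cons_append]; exact PySem.List.pyGet?_zero_cons _ _
      have hgb : PySem.List.pyGet? ((a :: cs) ++ [b]) ((cs.length : Int) + 1) = some b := by
        have h1 : ((cs.length : Int) + 1) = (((a :: cs).length : Int)) := by simp
        rw [h1]
        exact PySem.List.pyGet?_append_length _ _ _
      rw [hga, hgb]
      simp only [pal_cons_append_iff]
      by_cases hab : a = b
      · subst hab
        rw [if_neg (by simp)]
        have hidx : (cs.length : Int) + 1 - 1 = ((cs.length : Int) - 1) + 1 := by ring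
        have hs := removePalindromeSubLoop_shift a a cs 0 ((cs.length : Int) - 1) le_rfl (by omega)
        rw [hidx, hs, ih]
        by_cases hp : cs = cs.reverse
        · rw [if_pos hp, if_pos ⟨rfl, hp⟩]
        · rw [if_neg hp, if_neg (by rintro ⟨-, h⟩; exact hp h)]
      · rw [if_pos (by simpa using hab), if_neg (by rintro ⟨h, -⟩; exact hab h.symm)]

-- ===== VERDICT (by name: the statement is the Claim_ definition above) =====
theorem removePalindromeSub_spec : Claim_equal_removePalindromeSub := by
  intro s _
  unfold Spec_removePalindromeSub removePalindromeSub removePalindromeSub_alt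
  rw [PySem.Str.slice?_none_none_neg_one]
  rw [show PySem.Str.len s - 1 = (s.toList.length : Int) - 1 from by rw [PySem.Str.len_eq]]
  rw [removePalindromeSubLoop_eq]
  show (if s.toList = s.toList.reverse then 1 else 2)
      = if s = String.ofList s.toList.reverse then 1 else 2
  by_cases hp : s.toList = s.toList.reverse
  · rw [if_pos hp, if_pos (by rw [← hp]; simp)]
  · rw [if_neg hp, if_neg (by intro hc; apply hp; have := congrArg String.toList hc; simpa using this)]
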